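-- pv_equiv track=rewrite | github.com/Scottbae37/playground | python/algo/impl_1668.py | asce_cnt
-- ===== SOURCE A (Python) =====
-- def asce_cnt(l):
--     ans = 1
--     start = l[0]
--     for v in l[1:]:
--         if start < v:
--             ans += 1
--         start = max(start, v)
--     return ans
-- ===== SOURCE B (Python) =====
-- def asce_cnt(l):
--     # Count "leaders": elements strictly greater than every element before them.
--     # The first element is vacuously a leader, matching A's initial ans = 1.
--     return sum(1 for i, v in enumerate(l) if all(u < v for u in l[:i]))
-- ===== Notes on version B (the rewrite author's own statement) =====
-- stated objective: alternative
-- what changed: A keeps a running maximum and a counter in one stateful pass; B has no running state and instead counts, per position, whether the element strictly exceeds every earlier element (a left-to-right leaders count over prefixes).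
-- outside the precondition, e.g. on asce_cnt([]): A raises IndexError, B returns 0
import Mathlib
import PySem

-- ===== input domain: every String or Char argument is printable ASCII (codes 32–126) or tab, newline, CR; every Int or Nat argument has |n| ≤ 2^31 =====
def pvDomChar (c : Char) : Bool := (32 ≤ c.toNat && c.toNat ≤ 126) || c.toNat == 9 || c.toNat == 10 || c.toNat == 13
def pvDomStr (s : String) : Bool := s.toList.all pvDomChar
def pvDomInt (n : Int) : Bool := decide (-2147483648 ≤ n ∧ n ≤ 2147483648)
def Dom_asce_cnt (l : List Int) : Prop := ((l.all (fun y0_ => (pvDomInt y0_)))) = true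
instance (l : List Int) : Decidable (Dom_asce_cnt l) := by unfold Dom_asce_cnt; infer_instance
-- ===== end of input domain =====

-- B replaces A's single stateful pass (running maximum + counter) by a stateless
-- per-position count of "leaders" (elements strictly above every earlier element).

-- ===== PORT A =====
def asce_cnt (l : List Int) : Int :=
  match PySem.List.pyGet? l 0 with
  | none => 0  -- the initial subscript raises IndexError on an empty list; excluded by Pre_asce_cnt
  | some start =>
    ((PySem.List.slice l (some 1) none).foldl
      (fun (st : Int × Int) v => (if st.2 < v then st.1 + 1 else st.1, max st.2 v))
      (1, start)).1

-- ===== PORT B =====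
def asce_cnt_alt (l : List Int) : Int :=
  (PySem.List.enumerate l).foldl
    (fun acc p =>
      acc + (if (PySem.List.slice l (some 0) (some p.1)).all (fun u => decide (u < p.2)) then 1 else 0))
    0

-- ===== PRECONDITION & SPEC =====
-- Pre_ excludes exactly the empty list, on which A's initial subscript raises IndexError.
def Pre_asce_cnt (l : List Int) : Prop := l ≠ []
instance (l : List Int) : Decidable (Pre_asce_cnt l) := by unfold Pre_asce_cnt; infer_instance
def pvWitness_asce_cnt : List Int := [3, 1, 4, 4, 5]

def Spec_asce_cnt (l : List Int) (out : Int) : Prop := out = asce_cnt_alt l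
instance (l : List Int) (out : Int) : Decidable (Spec_asce_cnt l out) := by unfold Spec_asce_cnt; infer_instance

-- ===== CLAIM (what is proved, stated in full; the proofs are below) =====
def Claim_equal_asce_cnt : Prop := ∀ (l : List Int), Dom_asce_cnt l → Pre_asce_cnt l → Spec_asce_cnt l (asce_cnt l)

-- ===== LEMMAS AND PROOFS =====

-- Common reference value: count of strict increases of the running maximum m over the list.
def gAux (m : Int) : List Int → Int
  | [] => 0
  | v :: vs => (if m < v then 1 else 0) + gAux (max m v) vs

theorem lemA (xs : List Int) : ∀ (a m : Int),
    (xs.foldl (fun (st : Int × Int) v => (if st.2 < v then st.1 + 1 else st.1, max st.2 v)) (a, m)).1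
      = a + gAux m xs := by
  induction xs with
  | nil => intro a m; simp [gAux]
  | cons v vs ih =>
    intro a m
    simp only [List.foldl_cons, gAux, ih]
    split <;> omega

theorem lemB (l : List Int) : ∀ (xs pre : List Int) (m a : Int),
    pre ++ xs = l →
    (∀ w : Int, (pre.all (fun u => decide (u < w)) = true) ↔ m < w) →
    ((PySem.List.enumerate xs ((pre.length : Int))).foldl
      (fun acc p =>
        acc + (if (PySem.List.slice l (some 0) (some p.1)).all (fun u => decide (u < p.2)) then 1 else 0))
      a) = a + gAux m xs := by
  intro xs
  induction xs with
  | nil => intro pre m a _ _; simp [PySem.List.enumerate, gAux]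
  | cons v vs ih =>
    intro pre m a hl hall
    rw [PySem.List.enumerate_cons]
    simp only [List.foldl_cons]
    have hslice : PySem.List.slice l (some 0) (some ((pre.length : Int)))
        = (l.drop (0:Int).toNat).take ((pre.length : Int).toNat - (0:Int).toNat) :=
      PySem.List.slice_toNat l (by omega) (by positivity)
    have htake : PySem.List.slice l (some 0) (some ((pre.length : Int))) = pre := by
      rw [hslice, ← hl]; simp
    rw [htake]
    have hcond : (pre.all (fun u => decide (u < v)) = true) ↔ m < v := hall v
    have hstep : ((pre.length : Int) + 1) = (((pre ++ [v]).length : Nat) : Int) := by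
      simp
    rw [hstep]
    rw [ih (pre ++ [v]) (max m v) _ (by simpa using hl)
      (by intro w; simp only [List.all_append, List.all_cons, List.all_nil,
            Bool.and_eq_true, decide_eq_true_eq, and_true]
          rw [hall w]
          constructor
          · rintro ⟨h1, h2⟩; omega
          · intro h; constructor <;> omega)]
    simp only [gAux]
    by_cases h : m < v
    · rw [if_pos h, if_pos (by rwa [hcond])]; ring
    · rw [if_neg h, if_neg (by rw [hcond]; exact h)]; ring

theorem main_eq (x : Int) (xs : List Int) : asce_cnt (x :: xs) = asce_cnt_alt (x :: xs) := by
  have hA : asce_cnt (x :: xs) = 1 + gAux x xs := by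
    unfold asce_cnt
    simp only [PySem.List.pyGet?, PySem.List.pyIdx?]
    norm_num
    rw [PySem.List.slice_from _ (by omega)]
    simpa using lemA xs 1 x
  have hB : asce_cnt_alt (x :: xs) = 1 + gAux x xs := by
    unfold asce_cnt_alt
    rw [PySem.List.enumerate_cons]
    simp only [List.foldl_cons]
    have h0 : PySem.List.slice (x :: xs) (some 0) (some 0) = ([] : List Int) := by
      rw [PySem.List.slice_toNat _ (by omega) (by omega)]; simp
    rw [h0, if_pos (show (List.all ([] : List Int) fun u => decide (u < x)) = true from rfl)]
    simp only [zero_add]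
    have h1 := lemB (x :: xs) xs [x] x 1 rfl (by intro w; simp)
    simpa using h1
  rw [hA, hB]

-- ===== VERDICT (by name: the statement is the Claim_ definition above) =====
theorem asce_cnt_spec : Claim_equal_asce_cnt := by
  intro l _ hpre
  match l with
  | [] => exact absurd rfl hpre
  | x :: xs => exact main_eq x xs
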